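-- pv_equiv track=rewrite | github.com/Dr0x3525/Proyecto-final-programacion | ejercicios_parciales/ejercicios_parcial_3/ejercicio_1.py | encontrar_segundo_fibbonaci
-- ===== SOURCE A (Python) =====
-- def comprobar_ser_fibbonaci(numero):
--     numero = int(numero)
--     f1 = 0
--     f2 = 1
--     while f1 <= numero:
--         if f1 == numero:
--             return True
--         temp =  f1
--         f1 = f2
--         f2 = f1 + temp
--     return False
--
-- def encontrar_segundo_fibbonaci(vector):
--     contador_fib = 0
--     for indice in range(len(vector)):
--         if comprobar_ser_fibbonaci(vector[indice]):
--             contador_fib += 1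
--             if contador_fib == 2:
--                 return indice
--     return None
-- ===== SOURCE B (Python) =====
-- def encontrar_segundo_fibbonaci(vector):
--     if not vector:
--         return None
--     tope = max(vector)
--     fibs = set()
--     a, b = 0, 1
--     while a <= tope:
--         fibs.add(a)
--         a, b = b, b + a
--     contador = 0
--     for indice, valor in enumerate(vector):
--         if valor in fibs:
--             contador += 1
--             if contador == 2:
--                 return indice
--     return None
-- ===== Notes on version B (the rewrite author's own statement) =====
-- stated objective: faster
-- what changed: Instead of regenerating the Fibonacci sequence from 0 for every element, B computes max(vector) once, builds the set of Fibonacci numbers up to that maximum in one pass, and then scans the vector testing membership in that set.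
import Mathlib
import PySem

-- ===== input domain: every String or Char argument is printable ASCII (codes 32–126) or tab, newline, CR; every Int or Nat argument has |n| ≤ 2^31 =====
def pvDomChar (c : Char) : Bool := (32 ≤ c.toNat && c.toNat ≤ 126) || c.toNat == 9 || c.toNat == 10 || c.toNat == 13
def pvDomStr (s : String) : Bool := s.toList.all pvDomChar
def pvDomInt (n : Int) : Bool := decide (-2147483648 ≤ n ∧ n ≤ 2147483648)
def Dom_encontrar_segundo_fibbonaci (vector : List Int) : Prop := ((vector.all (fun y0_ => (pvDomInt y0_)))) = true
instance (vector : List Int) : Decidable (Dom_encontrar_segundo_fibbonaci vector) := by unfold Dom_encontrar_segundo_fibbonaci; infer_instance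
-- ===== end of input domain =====

-- B builds the set of Fibonacci numbers up to max(vector) once and scans with set membership,
-- instead of regenerating the Fibonacci sequence for every element (objective: faster).


-- ===== PORT A =====
-- the 'while f1 <= numero' loop of comprobar_ser_fibbonaci; the invariant hypotheses
-- (0 ≤ f1, 1 ≤ f2, f1 ≤ f2) only justify termination
def fibLoopA (numero f1 f2 : Int) (h1 : 0 ≤ f1) (h2 : 1 ≤ f2) (h3 : f1 ≤ f2) : Bool :=
  if f1 ≤ numero then
    if f1 = numero then true
    else fibLoopA numero f2 (f2 + f1) (by omega) (by omega) (by omega)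
  else false
termination_by ((numero + 1 - f1).toNat + (numero + 1 - f2).toNat)
decreasing_by omega

def comprobar_ser_fibbonaci (numero : Int) : Bool :=
  fibLoopA numero 0 1 (by decide) (by decide) (by decide)

-- the 'for indice in range(len(vector))' loop with early return
def loopA : List Int → Int → Int → Option Int
  | [], _, _ => none
  | x :: xs, indice, contador =>
    if comprobar_ser_fibbonaci x then
      let contador := contador + 1
      if contador = 2 then some indice else loopA xs (indice + 1) contador
    else loopA xs (indice + 1) contador

def encontrar_segundo_fibbonaci (vector : List Int) : Option Int :=
  loopA vector 0 0

-- ===== PORT B =====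
-- the 'while a <= tope: fibs.add(a)' loop (same termination hypotheses as A's loop)
def fibSetLoop (tope a b : Int) (acc : PySem.Set Int) (h1 : 0 ≤ a) (h2 : 1 ≤ b) (h3 : a ≤ b) : PySem.Set Int :=
  if a ≤ tope then
    fibSetLoop tope b (b + a) (PySem.Set.add acc a) (by omega) (by omega) (by omega)
  else acc
termination_by ((tope + 1 - a).toNat + (tope + 1 - b).toNat)
decreasing_by omega

-- the 'for indice, valor in enumerate(vector)' loop with early return
def scanB (fibs : PySem.Set Int) : List Int → Int → Int → Option Int
  | [], _, _ => none
  | valor :: rest, indice, contador =>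
    if PySem.Set.contains fibs valor then
      let contador := contador + 1
      if contador = 2 then some indice else scanB fibs rest (indice + 1) contador
    else scanB fibs rest (indice + 1) contador

def encontrar_segundo_fibbonaci_alt (vector : List Int) : Option Int :=
  match PySem.List.max? vector (fun x => x) with
  | none => none          -- 'if not vector: return None'
  | some tope =>
    scanB (fibSetLoop tope 0 1 PySem.Set.empty (by decide) (by decide) (by decide)) vector 0 0

-- ===== PRECONDITION & SPEC =====
def Spec_encontrar_segundo_fibbonaci (vector : List Int) (out : Option Int) : Prop := out = encontrar_segundo_fibbonaci_alt vector
instance (vector : List Int) (out : Option Int) : Decidable (Spec_encontrar_segundo_fibbonaci vector out) := by unfold Spec_encontrar_segundo_fibbonaci; infer_instance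

-- ===== CLAIM (what is proved, stated in full; the proofs are below) =====
def Claim_equal_encontrar_segundo_fibbonaci : Prop := ∀ (vector : List Int), Dom_encontrar_segundo_fibbonaci vector → Spec_encontrar_segundo_fibbonaci vector (encontrar_segundo_fibbonaci vector)

-- ===== LEMMAS AND PROOFS =====

lemma fibLoopA_of_lt (numero f1 f2 : Int) (h1 : 0 ≤ f1) (h2 : 1 ≤ f2) (h3 : f1 ≤ f2)
    (h : numero < f1) : fibLoopA numero f1 f2 h1 h2 h3 = false := by
  rw [fibLoopA]
  simp [not_le.mpr h]

lemma mem_fibSetLoop (tope a b : Int) (acc : PySem.Set Int)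
    (h1 : 0 ≤ a) (h2 : 1 ≤ b) (h3 : a ≤ b) (x : Int) (hx : x ≤ tope) :
    x ∈ fibSetLoop tope a b acc h1 h2 h3 ↔ (x ∈ acc ∨ fibLoopA x a b h1 h2 h3 = true) := by
  fun_induction fibSetLoop tope a b acc h1 h2 h3 with
  | case1 a b acc h1 h2 h3 hle ih =>
    rw [ih, PySem.Set.mem_add]
    conv_rhs => rw [fibLoopA]
    by_cases heq : a = x
    · subst heq
      refine iff_of_true (Or.inl (Or.inr rfl)) (Or.inr ?_)
      simp
    · by_cases hax : a ≤ x
      · rw [if_pos hax, if_neg heq]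
        constructor
        · rintro ((h | h) | h)
          · exact Or.inl h
          · exact absurd h.symm heq
          · exact Or.inr h
        · rintro (h | h)
          · exact Or.inl (Or.inl h)
          · exact Or.inr h
      · rw [if_neg hax, fibLoopA_of_lt x b (b + a) _ _ _ (by omega)]
        have hne : ¬ x = a := by omega
        simp [hne]
  | case2 a b acc h1 h2 h3 hle =>
    rw [fibLoopA_of_lt x a b h1 h2 h3 (by omega)]
    simp

lemma contains_fibSet (tope x : Int) (hx : x ≤ tope) :
    PySem.Set.contains (fibSetLoop tope 0 1 PySem.Set.empty (by decide) (by decide) (by decide)) x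
      = comprobar_ser_fibbonaci x := by
  have h := mem_fibSetLoop tope 0 1 PySem.Set.empty (by decide) (by decide) (by decide) x hx
  unfold comprobar_ser_fibbonaci
  rcases hb : fibLoopA x 0 1 (by decide) (by decide) (by decide) with _ | _
  · rw [Bool.eq_false_iff, Ne, PySem.Set.contains_iff, h]
    simp [PySem.Set.empty, hb]
  · rw [PySem.Set.contains_iff, h]
    simp [hb]

lemma scan_eq_loop (tope : Int) (l : List Int) (hub : ∀ x ∈ l, x ≤ tope) :
    ∀ (i c : Int),
      loopA l i c = scanB (fibSetLoop tope 0 1 PySem.Set.empty (by decide) (by decide) (by decide)) l i c := by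
  induction l with
  | nil => intro i c; rfl
  | cons x xs ih =>
    intro i c
    have hx : x ≤ tope := hub x (List.mem_cons_self ..)
    have hxs : ∀ y ∈ xs, y ≤ tope := fun y hy => hub y (List.mem_cons_of_mem _ hy)
    rw [loopA, scanB, contains_fibSet tope x hx]
    by_cases h : comprobar_ser_fibbonaci x = true
    · simp only [h, if_true]
      by_cases h2 : c + 1 = 2
      · simp [h2]
      · simp only [h2, if_false]
        exact ih hxs _ _
    · simp only [Bool.not_eq_true] at h
      simp only [h, Bool.false_eq_true, if_false]
      exact ih hxs _ _

-- ===== VERDICT (by name: the statement is the Claim_ definition above) =====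
theorem encontrar_segundo_fibbonaci_spec : Claim_equal_encontrar_segundo_fibbonaci := by
  intro vector _
  unfold Spec_encontrar_segundo_fibbonaci encontrar_segundo_fibbonaci encontrar_segundo_fibbonaci_alt
  rcases hm : PySem.List.max? vector (fun x => x) with _ | tope
  · rw [PySem.List.max?_eq_none_iff] at hm
    subst hm; rfl
  · exact scan_eq_loop tope vector (fun x hx => PySem.List.max?_isMax hm x hx) 0 0
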